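-- pv_equiv track=rewrite | github.com/artbohr/codewars-algorithms-in-python | 7-kyu/replace-every-nth.py | replace_nth
-- ===== SOURCE A (Python) =====
-- def replace_nth(text, n, old, new):
--     if n <= 0: return text
--
--     l = list(text)
--     count = 0
--
--     for c, i in enumerate(l):
--         if old in i:
--             count +=1
--
--         if old in i and count==n:
--             count = 0
--             l[c] = i.replace(old, new)
--
--     return ''.join(l)
-- ===== SOURCE B (Python) =====
-- def replace_nth(text, n, old, new):
--     if n <= 0:
--         return text
--     positions = [i for i, ch in enumerate(text) if old in ch]
--     chosen = {p for k, p in enumerate(positions) if k % n == n - 1}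
--     return ''.join(ch.replace(old, new) if i in chosen else ch
--                    for i, ch in enumerate(text))
-- ===== Notes on version B (the rewrite author's own statement) =====
-- stated objective: alternative
-- what changed: Replaces A's single stateful scan (a counter incremented per match and reset at n, mutating the char list in place) by a stateless index-table pipeline: collect all match positions, select every nth one by rank modulo n, then rebuild the string in one comprehension.
import Mathlib
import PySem

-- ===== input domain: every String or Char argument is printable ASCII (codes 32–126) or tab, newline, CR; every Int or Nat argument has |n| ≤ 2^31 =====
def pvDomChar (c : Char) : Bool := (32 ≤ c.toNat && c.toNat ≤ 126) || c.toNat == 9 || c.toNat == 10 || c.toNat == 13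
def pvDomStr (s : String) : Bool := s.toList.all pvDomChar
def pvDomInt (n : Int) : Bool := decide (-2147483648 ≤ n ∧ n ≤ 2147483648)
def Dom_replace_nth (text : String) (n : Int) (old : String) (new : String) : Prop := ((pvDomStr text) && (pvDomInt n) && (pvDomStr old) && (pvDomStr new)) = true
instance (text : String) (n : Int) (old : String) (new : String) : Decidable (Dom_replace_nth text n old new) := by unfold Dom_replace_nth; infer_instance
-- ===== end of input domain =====

-- B replaces A's stateful counter-reset scan by a stateless index-table pipeline (match positions, rank-mod-n selection, one rebuild pass); alternative decomposition, same cost.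


-- ===== PORT A =====
def replace_nth (text : String) (n : Int) (old : String) (new : String) : String :=
  if n ≤ 0 then text
  else
    let l := text.toList.map (fun ch => String.mk [ch])
    let fin := (PySem.List.enumerate l 0).foldl
      (fun (st : List String × Int) ci =>
        let count := if PySem.Str.isIn old ci.2 then st.2 + 1 else st.2
        if PySem.Str.isIn old ci.2 && decide (count = n) then
          (PySem.List.pySetD st.1 ci.1 (PySem.Str.replace ci.2 old new), 0)
        else (st.1, count))
      (l, 0)
    PySem.Str.join "" fin.1

-- ===== PORT B =====
def replace_nth_alt (text : String) (n : Int) (old : String) (new : String) : String :=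
  if n ≤ 0 then text
  else
    let cs := text.toList.map (fun ch => String.mk [ch])
    let positions := (PySem.List.enumerate cs 0).filterMap
      (fun p => if PySem.Str.isIn old p.2 then some p.1 else none)
    let chosen := PySem.Set.ofList ((PySem.List.enumerate positions 0).filterMap
      (fun q => if PySem.Int.mod q.1 n = n - 1 then some q.2 else none))
    PySem.Str.join "" ((PySem.List.enumerate cs 0).map
      (fun p => if PySem.Set.contains chosen p.1 then PySem.Str.replace p.2 old new else p.2))

-- ===== PRECONDITION & SPEC =====
def Spec_replace_nth (text : String) (n : Int) (old : String) (new : String) (out : String) : Prop := out = replace_nth_alt text n old new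
instance (text : String) (n : Int) (old : String) (new : String) (out : String) : Decidable (Spec_replace_nth text n old new out) := by unfold Spec_replace_nth; infer_instance

-- ===== CLAIM (what is proved, stated in full; the proofs are below) =====
def Claim_equal_replace_nth : Prop := ∀ (text : String) (n : Int) (old : String) (new : String), Dom_replace_nth text n old new → Spec_replace_nth text n old new (replace_nth text n old new)

-- ===== LEMMAS AND PROOFS =====

-- reference recursion: A's counter-reset scan written structurally
def pvCore (n : Int) (old new : String) : List String → Int → List String
  | [], _ => []
  | c :: rest, cnt =>
    let cnt' := if PySem.Str.isIn old c then cnt + 1 else cnt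
    if PySem.Str.isIn old c && decide (cnt' = n) then
      PySem.Str.replace c old new :: pvCore n old new rest 0
    else c :: pvCore n old new rest cnt'

lemma pvCore_length (n : Int) (old new : String) (cs : List String) (cnt : Int) :
    (pvCore n old new cs cnt).length = cs.length := by
  induction cs generalizing cnt with
  | nil => simp [pvCore]
  | cons c rest ih => simp only [pvCore]; split <;> split <;> simp [ih]

-- A's foldl over enumerate, with an already-finalised prefix, is pvCore on the suffix
lemma pvFoldA (n : Int) (old new : String) :
    ∀ (suffix done : List String) (cnt : Int),
    ((PySem.List.enumerate suffix (done.length : Int)).foldl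
      (fun (st : List String × Int) ci =>
        let count := if PySem.Str.isIn old ci.2 then st.2 + 1 else st.2
        if PySem.Str.isIn old ci.2 && decide (count = n) then
          (PySem.List.pySetD st.1 ci.1 (PySem.Str.replace ci.2 old new), 0)
        else (st.1, count))
      (done ++ suffix, cnt)).1
    = done ++ pvCore n old new suffix cnt := by
  intro suffix
  induction suffix with
  | nil => intro done cnt; simp [PySem.List.enumerate_nil, pvCore]
  | cons c rest ih =>
    intro done cnt
    rw [PySem.List.enumerate_cons, List.foldl_cons]
    by_cases hm : PySem.Str.isIn old c = true
    · have hm' : PySem.Chars.isIn old.toList c.toList = true := by simpa using hm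
      by_cases hc : cnt + 1 = n
      · simp only [hm, hc, if_true, decide_true, Bool.and_self, PySem.List.pySetD_natCast,
          List.set_append, Nat.lt_irrefl, if_false, Nat.sub_self, List.set_cons_zero]
        rw [show done ++ PySem.Str.replace c old new :: rest
              = (done ++ [PySem.Str.replace c old new]) ++ rest by simp,
            show ((done.length : Int) + 1) = (((done ++ [PySem.Str.replace c old new]).length : Int)) by simp,
            ih]
        simp [pvCore, hm', hc]
      · simp only [hm, if_true, hc, decide_false, Bool.and_false, if_false,
          Bool.false_eq_true]
        rw [show done ++ c :: rest = (done ++ [c]) ++ rest by simp,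
            show ((done.length : Int) + 1) = (((done ++ [c]).length : Int)) by simp,
            ih]
        simp [pvCore, hm', hc]
    · have hm' : PySem.Chars.isIn old.toList c.toList = false := by simpa using hm
      simp only [hm, Bool.false_and, if_false, Bool.false_eq_true]
      rw [show done ++ c :: rest = (done ++ [c]) ++ rest by simp,
          show ((done.length : Int) + 1) = (((done ++ [c]).length : Int)) by simp,
          ih]
      simp [pvCore, hm']

lemma eq_n_iff (n cnt : Int) (h0 : 0 ≤ cnt) (h1 : cnt < n) :
    (cnt + 1) % n = 0 ↔ cnt + 1 = n := by
  rcases eq_or_lt_of_le (by omega : cnt + 1 ≤ n) with h | h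
  · simp [h]
  · rw [Int.emod_eq_of_lt (by omega) h]; omega

lemma mod_pred_iff (n X : Int) (hn : 1 ≤ n) (hX : 0 ≤ X) :
    X % n = n - 1 ↔ (X + 1) % n = 0 := by
  have h0 : 0 ≤ X % n := Int.emod_nonneg X (by omega)
  have h1 : X % n < n := Int.emod_lt_of_pos X (by omega)
  have h2 : (X + 1) % n = (X % n + 1) % n := by
    conv_lhs => rw [show X + 1 = (X % n + 1) + n * (X / n) by
      have := Int.emod_add_ediv X n; omega]
    rw [Int.add_mul_emod_self_left]
  rw [h2, eq_n_iff n (X % n) h0 h1]; omega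

-- the k-th match position is the index j whose prefix holds exactly k earlier matches
lemma pvPos_spec (old : String) :
    ∀ (cs : List String) (s : Int) (k : Nat) (i : Int),
    ((PySem.List.enumerate cs s).filterMap
      (fun p => if PySem.Str.isIn old p.2 then some p.1 else none))[k]? = some i
    ↔ ∃ (j : Nat) (h : j < cs.length), i = s + j ∧ PySem.Str.isIn old cs[j] = true ∧
        (cs.take j).countP (fun c => PySem.Str.isIn old c) = k := by
  intro cs
  induction cs with
  | nil => intro s k i; simp [PySem.List.enumerate_nil]
  | cons c rest ih =>
    intro s k i
    rw [PySem.List.enumerate_cons]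
    by_cases hm : PySem.Str.isIn old c = true
    · have hm' : PySem.Chars.isIn old.toList c.toList = true := by simpa using hm
      cases k with
      | zero =>
        rw [List.filterMap_cons_some (b := s) (by simp [hm'])]
        simp only [List.getElem?_cons_zero, Option.some.injEq]
        constructor
        · intro h
          exact ⟨0, by simp, by omega, by simpa using hm, by simp⟩
        · rintro ⟨j, hj, hij, hmj, hcnt⟩
          cases j with
          | zero => omega
          | succ j' =>
            exfalso
            rw [List.take_succ_cons, List.countP_cons] at hcnt
            simp at hcnt
            simp [hcnt.2] at hm'
      | succ k' =>
        rw [List.filterMap_cons_some (b := s) (by simp [hm'])]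
        simp only [List.getElem?_cons_succ]
        rw [ih (s + 1) k' i]
        constructor
        · rintro ⟨j, hj, hij, hmj, hcnt⟩
          refine ⟨j + 1, by simpa using hj, by omega, by simpa using hmj, ?_⟩
          rw [List.take_succ_cons, List.countP_cons]
          simp only [hm, if_true]
          omega
        · rintro ⟨j, hj, hij, hmj, hcnt⟩
          cases j with
          | zero => rw [List.take_zero, List.countP_nil] at hcnt; omega
          | succ j' =>
            rw [List.take_succ_cons, List.countP_cons] at hcnt
            simp only [hm, if_true] at hcnt
            refine ⟨j', by simpa using hj, by omega, by simpa using hmj, by omega⟩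
    · have hm' : PySem.Chars.isIn old.toList c.toList = false := by simpa using hm
      rw [List.filterMap_cons_none (by simp [hm'])]
      rw [ih (s + 1) k i]
      constructor
      · rintro ⟨j, hj, hij, hmj, hcnt⟩
        refine ⟨j + 1, by simpa using hj, by omega, by simpa using hmj, ?_⟩
        rw [List.take_succ_cons, List.countP_cons]
        simp only [hm, if_false, Bool.false_eq_true]
        omega
      · rintro ⟨j, hj, hij, hmj, hcnt⟩
        cases j with
        | zero => simp_all
        | succ j' =>
          rw [List.take_succ_cons, List.countP_cons] at hcnt
          simp only [hm, if_false, Bool.false_eq_true] at hcnt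
          refine ⟨j', by simpa using hj, by omega, by simpa using hmj, by omega⟩

-- pvCore, elementwise: index j is replaced iff it matches and its running count hits a multiple of n
lemma pvCore_get (n : Int) (old new : String) (hn : 1 ≤ n) :
    ∀ (cs : List String) (cnt : Int) (h0 : 0 ≤ cnt) (h1 : cnt < n) (j : Nat) (hj : j < cs.length),
    (pvCore n old new cs cnt)[j]? =
      some (if PySem.Str.isIn old cs[j] &&
              decide ((cnt + ((cs.take j).countP (fun c => PySem.Str.isIn old c) : Int) + 1) % n = 0)
            then PySem.Str.replace cs[j] old new else cs[j]) := by
  intro cs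
  induction cs with
  | nil => intro cnt h0 h1 j hj; simp at hj
  | cons c rest ih =>
    intro cnt h0 h1 j hj
    by_cases hm : PySem.Str.isIn old c = true
    · have hm' : PySem.Chars.isIn old.toList c.toList = true := by simpa using hm
      by_cases hc : cnt + 1 = n
      · have hcore : pvCore n old new (c :: rest) cnt
            = PySem.Str.replace c old new :: pvCore n old new rest 0 := by
          simp [pvCore, hm', hc]
        rw [hcore]
        cases j with
        | zero =>
          simp only [List.getElem?_cons_zero, List.getElem_cons_zero, List.take_zero,
            List.countP_nil, Nat.cast_zero, add_zero, hm, Bool.true_and]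
          have hz : (cnt + 1) % n = 0 := (eq_n_iff n cnt h0 h1).mpr hc
          simp [hz]
        | succ j' =>
          simp only [List.getElem?_cons_succ, List.getElem_cons_succ, List.take_succ_cons,
            List.countP_cons, hm, if_pos, decide_true]
          rw [ih 0 (by omega) (by omega) j' (by simpa using hj)]
          congr 2
          have h2 : (cnt + (((rest.take j').countP (fun c => PySem.Str.isIn old c) + 1 : Nat) : Int) + 1)
              = (0 + (((rest.take j').countP (fun c => PySem.Str.isIn old c) : Nat) : Int) + 1) + n * 1 := by
            push_cast; omega
          rw [h2, Int.add_mul_emod_self_left]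
      · have hcore : pvCore n old new (c :: rest) cnt
            = c :: pvCore n old new rest (cnt + 1) := by
          simp [pvCore, hm', hc]
        rw [hcore]
        cases j with
        | zero =>
          simp only [List.getElem?_cons_zero, List.getElem_cons_zero, List.take_zero,
            List.countP_nil, Nat.cast_zero, add_zero, hm, Bool.true_and]
          have hz : ¬((cnt + 1) % n = 0) := fun h => hc ((eq_n_iff n cnt h0 h1).mp h)
          simp [hz]
        | succ j' =>
          simp only [List.getElem?_cons_succ, List.getElem_cons_succ, List.take_succ_cons,
            List.countP_cons, hm, if_pos, decide_true]
          rw [ih (cnt + 1) (by omega) (by omega) j' (by simpa using hj)]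
          congr 2
          push_cast
          ring_nf
    · have hm' : PySem.Chars.isIn old.toList c.toList = false := by simpa using hm
      have hcore : pvCore n old new (c :: rest) cnt
          = c :: pvCore n old new rest cnt := by
        simp [pvCore, hm, hm']
      rw [hcore]
      cases j with
      | zero =>
        simp only [List.getElem?_cons_zero, List.getElem_cons_zero, hm]
        simp
      | succ j' =>
        simp only [List.getElem?_cons_succ, List.getElem_cons_succ, List.take_succ_cons,
          List.countP_cons, hm, if_false, Bool.false_eq_true]
        rw [ih cnt (by omega) (by omega) j' (by simpa using hj)]
        norm_num

-- B's chosen set holds exactly the matching indices whose 1-based match rank is a multiple of n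
lemma pvChosen_iff (n : Int) (old : String) (hn : 1 ≤ n) (cs : List String) (j : Nat) (hj : j < cs.length) :
    (PySem.Set.contains (PySem.Set.ofList
      ((PySem.List.enumerate
          ((PySem.List.enumerate cs 0).filterMap
            (fun p => if PySem.Str.isIn old p.2 then some p.1 else none)) 0).filterMap
        (fun q => if PySem.Int.mod q.1 n = n - 1 then some q.2 else none))) ((j : Nat) : Int))
    = (PySem.Str.isIn old cs[j] &&
        decide ((0 + ((cs.take j).countP (fun c => PySem.Str.isIn old c) : Int) + 1) % n = 0)) := by
  rw [Bool.eq_iff_iff]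
  set positions := (PySem.List.enumerate cs 0).filterMap
      (fun p => if PySem.Str.isIn old p.2 then some p.1 else none) with hpos
  rw [PySem.Set.contains_iff, PySem.Set.mem_ofList]
  rw [List.mem_filterMap]
  constructor
  · rintro ⟨q, hq, hg⟩
    rw [PySem.List.mem_enumerate_iff] at hq
    obtain ⟨k, hk, rfl⟩ := hq
    by_cases hcond : PySem.Int.mod ((0 : Int) + (k : Int)) n = n - 1
    · rw [if_pos hcond] at hg
      injection hg with hg
      have hg' : positions[k] = ((j : Nat) : Int) := hg
      have hps : positions[k]? = some ((j : Nat) : Int) := by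
        rw [List.getElem?_eq_getElem hk, hg']
      rw [hpos, pvPos_spec old cs 0 k ((j : Nat) : Int)] at hps
      obtain ⟨j', hj', hij, hmj, hcnt⟩ := hps
      have hjj : j' = j := by omega
      subst hjj
      rw [PySem.Int.mod_eq_emod_of_pos (by omega),
        show ((0 : Int) + (k : Int)) = (k : Int) by ring] at hcond
      have h2 := (mod_pred_iff n (k : Int) hn (by positivity)).mp hcond
      simp only [hmj, Bool.true_and, decide_eq_true_eq]
      rw [hcnt, show ((0 : Int) + (k : Int) + 1) = ((k : Int) + 1) by ring]
      exact h2
    · rw [if_neg hcond] at hg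
      cases hg
  · intro h
    simp only [Bool.and_eq_true, decide_eq_true_eq] at h
    obtain ⟨hmj, hz⟩ := h
    set k := (cs.take j).countP (fun c => PySem.Str.isIn old c) with hk
    have hps : positions[k]? = some ((j : Nat) : Int) := by
      rw [hpos, pvPos_spec old cs 0 k ((j : Nat) : Int)]
      exact ⟨j, hj, by omega, hmj, rfl⟩
    have hklen : k < positions.length := (List.getElem?_eq_some_iff.mp hps).1
    refine ⟨((0 : Int) + (k : Int), positions[k]), ?_, ?_⟩
    · rw [PySem.List.mem_enumerate_iff]
      exact ⟨k, hklen, rfl⟩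
    · rw [if_pos ?_, (List.getElem?_eq_some_iff.mp hps).2]
      rw [PySem.Int.mod_eq_emod_of_pos (by omega),
        show ((0 : Int) + (k : Int)) = (k : Int) by ring,
        mod_pred_iff n _ hn (by positivity),
        show ((k : Int) + 1) = (0 + (k : Int) + 1) by ring]
      exact hz

-- ===== VERDICT (by name: the statement is the Claim_ definition above) =====
theorem replace_nth_spec : Claim_equal_replace_nth := by
  intro text n old new _
  unfold Spec_replace_nth replace_nth replace_nth_alt
  by_cases hn : n ≤ 0
  · simp [hn]
  · have hn1 : 1 ≤ n := by omega
    simp only [hn, if_false]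
    congr 1
    set cs := text.toList.map (fun ch => String.mk [ch]) with hcs
    have hA : ((PySem.List.enumerate cs 0).foldl
        (fun (st : List String × Int) ci =>
          let count := if PySem.Str.isIn old ci.2 then st.2 + 1 else st.2
          if PySem.Str.isIn old ci.2 && decide (count = n) then
            (PySem.List.pySetD st.1 ci.1 (PySem.Str.replace ci.2 old new), 0)
          else (st.1, count))
        (cs, 0)).1 = pvCore n old new cs 0 := by
      have h := pvFoldA n old new cs [] 0
      simpa using h
    rw [hA]
    apply Eq.symm
    apply List.ext_getElem?
    intro j
    by_cases hjl : j < cs.length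
    · rw [pvCore_get n old new hn1 cs 0 le_rfl (by omega) j hjl]
      rw [List.getElem?_map, PySem.List.getElem?_enumerate, List.getElem?_eq_getElem hjl]
      simp only [Option.map_some]
      rw [show ((0 : Int) + (j : Int)) = ((j : Nat) : Int) by ring]
      rw [pvChosen_iff n old hn1 cs j hjl]
    · rw [List.getElem?_eq_none (by simpa using Nat.le_of_not_lt hjl),
          List.getElem?_eq_none (by rw [pvCore_length]; exact Nat.le_of_not_lt hjl)]
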